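-- pv_equiv track=rewrite | github.com/DeerFreckles/training-encrypted-words | encrypted_words.py | findEncryptedWord
-- ===== SOURCE A (Python) =====
-- import math
--
-- def findEncryptedWord(S):
--     if len(S) == 0:                 # Hard-stop for recursive endpoints
--         return ""
--     n = math.ceil(len(S)/2)-1       # Midpoint calculation
--     R = S[n]                        # Initial appending of middle-est character
--     R += findEncryptedWord(S[:n])   # Recursive calls
--     R += findEncryptedWord(S[n+1:])
--     return R                        # Final string returned (if S is originally not empty)
-- ===== SOURCE B (Python) =====
-- def findEncryptedWord(S):
--     out = []
--     stack = [(0, len(S))]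
--     while stack:
--         lo, hi = stack.pop()
--         if lo >= hi:
--             continue
--         idx = lo + (hi - lo - 1) // 2
--         out.append(S[idx])
--         stack.append((idx + 1, hi))
--         stack.append((lo, idx))
--     return "".join(out)
-- ===== Notes on version B (the rewrite author's own statement) =====
-- stated objective: alternative
-- what changed: Replaces A's recursion on string slices (each call copies S[:n] and S[n+1:]) with an iterative explicit stack of (lo,hi) index ranges over the original string, indexing characters directly and joining an output list.
import Mathlib
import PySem

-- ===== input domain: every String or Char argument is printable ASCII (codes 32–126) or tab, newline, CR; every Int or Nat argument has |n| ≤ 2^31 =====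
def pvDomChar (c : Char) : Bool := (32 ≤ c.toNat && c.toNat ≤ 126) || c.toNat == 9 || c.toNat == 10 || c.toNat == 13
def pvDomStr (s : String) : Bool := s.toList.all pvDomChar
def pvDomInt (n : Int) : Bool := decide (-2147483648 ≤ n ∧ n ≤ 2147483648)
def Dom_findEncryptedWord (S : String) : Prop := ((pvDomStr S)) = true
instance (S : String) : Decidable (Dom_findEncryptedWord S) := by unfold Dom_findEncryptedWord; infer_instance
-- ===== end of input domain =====

-- B replaces A's slicing recursion with an explicit stack of (lo,hi) index ranges
-- over the original string (same pre-order traversal, no slice copies): objective 'alternative'.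

-- ===== PORT A =====
-- A's recursion, over the character list; Python's n = math.ceil(len/2)-1 is
-- (len+1)/2-1 in Nat (inlined where A's n is used); S[n] is a nonnegative
-- in-range index (l[n]?), and S[:n] / S[n+1:] are take/drop (exact for
-- nonnegative in-range bounds). The extra fuel argument only makes the same
-- recursion structural: it starts at |S| and is never exhausted (depth < |S|).
def goA : Nat → List Char → List Char
  | 0, _ => []
  | fuel + 1, l =>
    if l = [] then []
    else
      l[(l.length + 1) / 2 - 1]?.toList
        ++ goA fuel (l.take ((l.length + 1) / 2 - 1))
        ++ goA fuel (l.drop ((l.length + 1) / 2 - 1 + 1))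

def findEncryptedWord (S : String) : String := String.mk (goA S.toList.length S.toList)

-- ===== PORT B =====
-- Source B's while-loop over the stack; stack.pop() = head of the list (the stack is
-- kept head-first, so 'append right then left' is 'cons left then right');
-- Source B's idx = lo + (hi-lo-1)//2 is inlined where used. The fuel argument only
-- makes the loop structural: 2|S|+1 bounds the number of pops and is never exhausted.
def goB : Nat → List Char → List (Nat × Nat) → List Char → List Char
  | 0, _, _, out => out
  | fuel + 1, l, stack, out =>
    match stack with
    | [] => out
    | (lo, hi) :: rest =>
      if lo ≥ hi then goB fuel l rest out
      else
        goB fuel l ((lo, lo + (hi - lo - 1) / 2) :: (lo + (hi - lo - 1) / 2 + 1, hi) :: rest)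
          (out ++ l[lo + (hi - lo - 1) / 2]?.toList)

def findEncryptedWord_alt (S : String) : String :=
  String.mk (goB (2 * S.toList.length + 1) S.toList [(0, S.toList.length)] [])

-- ===== PRECONDITION & SPEC =====
def Spec_findEncryptedWord (S : String) (out : String) : Prop := out = findEncryptedWord_alt S
instance (S : String) (out : String) : Decidable (Spec_findEncryptedWord S out) := by unfold Spec_findEncryptedWord; infer_instance

-- ===== CLAIM (what is proved, stated in full; the proofs are below) =====
def Claim_equal_findEncryptedWord : Prop := ∀ (S : String), Dom_findEncryptedWord S → Spec_findEncryptedWord S (findEncryptedWord S)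

-- ===== LEMMAS AND PROOFS =====

-- the segment of l from lo (inclusive) to hi (exclusive)
def seg (l : List Char) (lo hi : Nat) : List Char := (l.drop lo).take (hi - lo)

-- goA run with exactly enough fuel
def runA (l : List Char) : List Char := goA l.length l

-- the total length of the ranges still on the stack
def sumR (stack : List (Nat × Nat)) : Nat := stack.foldr (fun p acc => (p.2 - p.1) + acc) 0

lemma seg_length (l : List Char) (lo hi : Nat) (hhi : hi ≤ l.length) (hlo : lo ≤ hi) :
    (seg l lo hi).length = hi - lo := by
  simp [seg, List.length_take, List.length_drop]; omega

lemma goA_succ (f : Nat) (l : List Char) (h : l ≠ []) :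
    goA (f + 1) l =
      l[(l.length + 1) / 2 - 1]?.toList
        ++ goA f (l.take ((l.length + 1) / 2 - 1))
        ++ goA f (l.drop ((l.length + 1) / 2 - 1 + 1)) := by
  simp [goA, h]

-- any fuel at least |l| computes the same value
lemma goA_fuel : ∀ (f : Nat) (g : Nat) (l : List Char), l.length ≤ f → l.length ≤ g →
    goA f l = goA g l := by
  intro f
  induction f with
  | zero =>
    intro g l hf _
    have : l = [] := List.eq_nil_of_length_eq_zero (by omega)
    subst this
    cases g <;> simp [goA]
  | succ f ih =>
    intro g l hf hg
    cases g with
    | zero =>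
      have : l = [] := List.eq_nil_of_length_eq_zero (by omega)
      subst this
      simp [goA]
    | succ g =>
      by_cases hl : l = []
      · simp [goA, hl]
      · have hlen : l.length ≠ 0 := fun h => hl (List.eq_nil_of_length_eq_zero h)
        rw [goA_succ f l hl, goA_succ g l hl]
        congr 1
        · congr 1
          apply ih
          · simp [List.length_take]; omega
          · simp [List.length_take]; omega
        · apply ih
          · simp [List.length_drop]; omega
          · simp [List.length_drop]; omega

-- A's step on a nonempty in-range segment, phrased with B's index arithmetic
lemma goA_seg_step (l : List Char) (lo hi : Nat) (hlo : lo < hi) (hhi : hi ≤ l.length) :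
    runA (seg l lo hi) =
      l[lo + (hi - lo - 1) / 2]?.toList
        ++ runA (seg l lo (lo + (hi - lo - 1) / 2))
        ++ runA (seg l (lo + (hi - lo - 1) / 2 + 1) hi) := by
  have hlen : (seg l lo hi).length = hi - lo := seg_length l lo hi hhi (le_of_lt hlo)
  have hne : seg l lo hi ≠ [] := by
    intro h; rw [h] at hlen; simp at hlen; omega
  have hc : (seg l lo hi)[(hi - lo - 1) / 2]? = l[lo + (hi - lo - 1) / 2]? := by
    have h1 : (hi - lo - 1) / 2 < hi - lo := by omega
    simp [seg, List.getElem?_take, h1, List.getElem?_drop]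
  have hlft : (seg l lo hi).take ((hi - lo - 1) / 2) = seg l lo (lo + (hi - lo - 1) / 2) := by
    simp only [seg, List.take_take]
    congr 1
    all_goals omega
  have hrt : (seg l lo hi).drop ((hi - lo - 1) / 2 + 1) = seg l (lo + (hi - lo - 1) / 2 + 1) hi := by
    simp only [seg, List.drop_take, List.drop_drop]
    congr 1
    all_goals first
      | omega
      | (congr 1 <;> omega)
  obtain ⟨m, hm⟩ : ∃ m, (seg l lo hi).length = m + 1 := ⟨(seg l lo hi).length - 1, by omega⟩
  have hm' : m = hi - lo - 1 := by omega
  unfold runA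
  rw [hm, goA_succ m _ hne, hlen]
  have hn : (hi - lo + 1) / 2 - 1 = (hi - lo - 1) / 2 := by omega
  rw [hn, hc, hlft, hrt]
  have e1 : goA m (seg l lo (lo + (hi - lo - 1) / 2)) =
      goA (seg l lo (lo + (hi - lo - 1) / 2)).length (seg l lo (lo + (hi - lo - 1) / 2)) := by
    apply goA_fuel
    · rw [seg_length l lo _ (by omega) (by omega)]; omega
    · exact le_refl _
  have e2 : goA m (seg l (lo + (hi - lo - 1) / 2 + 1) hi) =
      goA (seg l (lo + (hi - lo - 1) / 2 + 1) hi).length (seg l (lo + (hi - lo - 1) / 2 + 1) hi) := by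
    apply goA_fuel
    · rw [seg_length l _ hi (by omega) (by omega)]; omega
    · exact le_refl _
  rw [e1, e2]

lemma goB_spec (l : List Char) :
    ∀ (fuel : Nat) (stack : List (Nat × Nat)) (out : List Char),
      (∀ p ∈ stack, p.2 ≤ l.length) →
      2 * sumR stack + stack.length ≤ fuel →
      goB fuel l stack out = out ++ (stack.map (fun p => runA (seg l p.1 p.2))).flatten := by
  intro fuel
  induction fuel with
  | zero =>
    intro stack out _ hfuel
    have : stack = [] := by
      cases stack with
      | nil => rfl
      | cons p rest => simp [sumR] at hfuel
    subst this
    simp [goB]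
  | succ fuel ih =>
    intro stack out hb hfuel
    cases stack with
    | nil => simp [goB]
    | cons p rest =>
      obtain ⟨lo, hi⟩ := p
      by_cases h : lo ≥ hi
      · have hseg : seg l lo hi = [] := by
          simp [seg]; omega
        have hsum : sumR ((lo, hi) :: rest) = sumR rest := by
          simp [sumR]; omega
        simp only [goB, if_pos h]
        rw [ih rest out (fun p hp => hb p (List.mem_cons_of_mem _ hp))
            (by simp [hsum, List.length_cons] at hfuel ⊢; omega)]
        simp [hseg, runA, goA]
      · have hlt : lo < hi := by omega
        have hhi : hi ≤ l.length := hb (lo, hi) (List.mem_cons_self ..)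
        simp only [goB, if_neg h]
        rw [ih]
        · simp only [List.map_cons, List.flatten_cons, List.append_assoc]
          rw [goA_seg_step l lo hi hlt hhi]
          simp [List.append_assoc]
        · intro p hp
          simp only [List.mem_cons] at hp
          rcases hp with hp | hp | hp
          · subst hp; simp only; omega
          · subst hp; exact hhi
          · exact hb p (List.mem_cons_of_mem _ hp)
        · have hsum : sumR ((lo, lo + (hi - lo - 1) / 2) :: (lo + (hi - lo - 1) / 2 + 1, hi) :: rest)
              = (hi - lo - 1) + sumR rest := by
            simp [sumR]; omega
          have hsum' : sumR ((lo, hi) :: rest) = (hi - lo) + sumR rest := by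
            simp [sumR]
          rw [hsum]
          rw [hsum'] at hfuel
          simp only [List.length_cons] at hfuel ⊢
          omega

-- ===== VERDICT (by name: the statement is the Claim_ definition above) =====
theorem findEncryptedWord_spec : Claim_equal_findEncryptedWord := by
  intro S _
  unfold Spec_findEncryptedWord findEncryptedWord findEncryptedWord_alt
  rw [goB_spec]
  · simp only [List.map_cons, List.map_nil, List.flatten_cons, List.flatten_nil,
      List.nil_append, List.append_nil, seg, Nat.sub_zero, List.drop_zero, List.take_length, runA]
  · intro p hp
    simp only [List.mem_cons, List.not_mem_nil, or_false] at hp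
    subst hp
    exact le_refl _
  · simp [sumR]
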